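-- pv_equiv track=rewrite | github.com/VictorOnink/Advent-of-Code | advent_of_code/aoc_2023/day_1/day_1_solution.py | get_all_numbers_from_row
-- ===== SOURCE A (Python) =====
-- from typing import Dict, List
--
-- SPELLED_MAPPING: Dict[str, str] = {
--     "one": "1",
--     "two": "2",
--     "three": "3",
--     "four": "4",
--     "five": "5",
--     "six": "6",
--     "seven": "7",
--     "eight": "8",
--     "nine": "9",
-- }
--
-- def get_all_numbers_from_row(row: str) -> List[str]:
--     all_numbers: List[str] = list()
--     for char_index in range(len(row)):
--         if row[char_index].isnumeric():
--             all_numbers.append(row[char_index])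
--         for spelled_digit, digit in SPELLED_MAPPING.items():
--             try:
--                 if row[char_index:].index(spelled_digit) == 0:
--                     all_numbers.append(digit)
--             except ValueError:
--                 continue
--     return all_numbers
-- ===== SOURCE B (Python) =====
-- from typing import Dict, List
--
-- SPELLED_MAPPING: Dict[str, str] = {
--     "one": "1",
--     "two": "2",
--     "three": "3",
--     "four": "4",
--     "five": "5",
--     "six": "6",
--     "seven": "7",
--     "eight": "8",
--     "nine": "9",
-- }
--
-- def get_all_numbers_from_row(row: str) -> List[str]:
--     pairs = [(i, ch) for i, ch in enumerate(row) if ch.isnumeric()]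
--     for word, digit in SPELLED_MAPPING.items():
--         start = row.find(word)
--         while start != -1:
--             pairs.append((start, digit))
--             start = row.find(word, start + 1)
--     pairs.sort(key=lambda p: p[0])
--     return [tok for _, tok in pairs]
-- ===== Notes on version B (the rewrite author's own statement) =====
-- stated objective: faster
-- what changed: Instead of scanning position-by-position and slicing row[i:] to substring-search every spelled word at each index, B collects (position, token) pairs in separate passes - one enumerate pass for digit characters and one str.find loop per spelled word - then sorts the pairs by position and returns the tokens.
import Mathlib
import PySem

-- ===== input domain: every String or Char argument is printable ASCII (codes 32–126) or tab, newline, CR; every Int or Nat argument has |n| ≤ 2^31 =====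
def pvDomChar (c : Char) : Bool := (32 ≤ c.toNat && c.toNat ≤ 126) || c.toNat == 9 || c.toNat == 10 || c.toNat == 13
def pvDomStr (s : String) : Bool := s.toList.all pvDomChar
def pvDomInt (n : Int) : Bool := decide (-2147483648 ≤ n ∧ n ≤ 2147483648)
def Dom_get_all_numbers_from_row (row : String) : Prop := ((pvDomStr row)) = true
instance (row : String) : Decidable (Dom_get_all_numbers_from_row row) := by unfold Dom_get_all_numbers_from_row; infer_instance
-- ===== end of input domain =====

-- B gathers all (position, token) pairs — digit characters in one pass, each spelled word by a
-- repeated find loop — and sorts them by position, instead of A's per-position scan; objective: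
-- faster (no per-position slicing / substring search). isnumeric() is ported as isdigit, exact on
-- the ASCII domain Dom_.

-- ===== PORT A =====
def SPELLED_MAPPING : List (String × String) :=
  [("one", "1"), ("two", "2"), ("three", "3"), ("four", "4"), ("five", "5"),
   ("six", "6"), ("seven", "7"), ("eight", "8"), ("nine", "9")]

def get_all_numbers_from_row (row : String) : List String :=
  (PySem.List.pyRange 0 (row.toList.length : Int)).foldl (fun all_numbers char_index =>
    let all_numbers :=
      match PySem.Str.pyGet? row char_index with
      | some c => if PySem.Chars.isdigit c then all_numbers ++ [String.ofList [c]] else all_numbers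
      | none => all_numbers    -- unreachable: char_index ∈ range(len(row))
    -- row[char_index:].index(w) == 0, with ValueError (find = -1) caught as 'continue'
    SPELLED_MAPPING.foldl (fun all_numbers wd =>
      if PySem.Chars.find (PySem.List.slice row.toList (some char_index) none) wd.1.toList = 0
      then all_numbers ++ [wd.2] else all_numbers) all_numbers) []

-- ===== PORT B =====
-- the 'while start != -1' loop of Source B; fuel (s.length + 1 - start bounds the iterations) only
-- makes the recursion structural, the computation is the loop's
def pvFindAll (s w : List Char) (d : String) : Int → Nat → List (Int × String)
  | _, 0 => []
  | start, fuel + 1 =>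
    let j := PySem.Chars.findFrom s w start
    if j = -1 then [] else (j, d) :: pvFindAll s w d (j + 1) fuel

def get_all_numbers_from_row_alt (row : String) : List String :=
  let s := row.toList
  let pairs := ((PySem.List.enumerate s).filter (fun p => PySem.Chars.isdigit p.2)).map
      (fun p => (p.1, String.ofList [p.2]))
  let pairs := SPELLED_MAPPING.foldl
      (fun acc wd => acc ++ pvFindAll s wd.1.toList wd.2 0 (s.length + 1)) pairs
  (PySem.List.sorted pairs (fun p => p.1)).map (fun p => p.2)

-- ===== PRECONDITION & SPEC =====
def Spec_get_all_numbers_from_row (row : String) (out : List String) : Prop := out = get_all_numbers_from_row_alt row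
instance (row : String) (out : List String) : Decidable (Spec_get_all_numbers_from_row row out) := by unfold Spec_get_all_numbers_from_row; infer_instance

-- ===== CLAIM (what is proved, stated in full; the proofs are below) =====
def Claim_equal_get_all_numbers_from_row : Prop := ∀ (row : String), Dom_get_all_numbers_from_row row → Spec_get_all_numbers_from_row row (get_all_numbers_from_row row)

-- ===== LEMMAS AND PROOFS =====

-- the canonical token list: at position i, the digit character (if any) then the spelled digits
def pvTok (s : List Char) (i : Nat) : List (Int × String) :=
  (match s[i]? with
   | some c => if PySem.Chars.isdigit c then [((i : Int), String.ofList [c])] else []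
   | none => []) ++
  SPELLED_MAPPING.filterMap (fun wd =>
    if wd.1.toList <+: s.drop i then some ((i : Int), wd.2) else none)

def pvAll (s : List Char) : List (Int × String) := (List.range s.length).flatMap (pvTok s)

lemma pv_find_eq_zero_iff (t w : List Char) : PySem.Chars.find t w = 0 ↔ w <+: t := by
  constructor
  · intro h
    have h0 : (0 : Int) ≤ PySem.Chars.find t w := by omega
    have := (PySem.Chars.find_spec h0).1
    rw [h] at this; simpa using this
  · intro h
    have hin : w <:+: t := h.isInfix
    have hne : PySem.Chars.find t w ≠ -1 := (PySem.Chars.find_ne_neg_one_iff t w).2 hin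
    have h0 : (0 : Int) ≤ PySem.Chars.find t w := by
      have := PySem.Chars.neg_one_le_find t w; omega
    have hmin := (PySem.Chars.find_spec h0).2
    by_contra hne0
    have hpos : 0 < (PySem.Chars.find t w).toNat := by omega
    exact hmin 0 hpos (by simpa using h)

lemma pv_filterMap_snd (l : List (String × String)) (P : String × String → Prop)
    [DecidablePred P] (i : Int) :
    (l.filterMap (fun wd => if P wd then some (i, wd.2) else none)).map (fun p => p.2)
    = (l.filter (fun wd => decide (P wd))).map (fun wd => wd.2) := by
  induction l with
  | nil => rfl
  | cons a t ih => by_cases h : P a <;> simp [h, ih]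

lemma pv_A_eq_map_pvAll (row : String) :
    get_all_numbers_from_row row = (pvAll row.toList).map (fun p => p.2) := by
  unfold get_all_numbers_from_row
  rw [PySem.List.pyRange_zero_natCast, List.foldl_map]
  rw [PySem.List.foldl_congr_mem _ _
    (fun acc k => acc ++ (pvTok row.toList k).map (fun p => p.2)) _ ?_]
  · rw [PySem.List.foldl_append_eq_flatMap]
    simp [pvAll, List.map_flatMap]
  · intro acc k hk
    simp only [List.mem_range] at hk
    simp only [PySem.Str.pyGet?_eq, PySem.Chars.pyGet?_eq_listPyGet?,
      PySem.List.pyGet?_natCast, PySem.List.slice_from_natCast,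
      List.getElem?_eq_getElem hk]
    rw [PySem.List.foldl_append_ite
      (fun wd : String × String => PySem.Chars.find (row.toList.drop k) wd.1.toList = 0)
      (fun wd : String × String => wd.2) SPELLED_MAPPING]
    simp only [pvTok, List.getElem?_eq_getElem hk, List.map_append, pv_filterMap_snd]
    have hfc : List.filter
        (fun wd : String × String =>
          decide (PySem.Chars.find (row.toList.drop k) wd.1.toList = 0)) SPELLED_MAPPING
        = List.filter (fun wd => decide (wd.1.toList <+: List.drop k row.toList))
            SPELLED_MAPPING :=
      List.filter_congr (fun wd _ => by
        simp only [decide_eq_decide]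
        exact pv_find_eq_zero_iff (row.toList.drop k) wd.1.toList)
    rw [hfc]
    by_cases hd : PySem.Chars.isdigit row.toList[k] <;> simp [hd, List.append_assoc]

lemma pvFindAll_eq (s w : List Char) (d : String) (hw : w ≠ []) :
    ∀ fuel start, start ≤ s.length → s.length + 1 - start ≤ fuel →
    pvFindAll s w d (start : Int) fuel =
      (List.range' start (s.length - start)).flatMap
        (fun i => if w <+: s.drop i then [((i : Int), d)] else []) := by
  intro fuel
  induction fuel with
  | zero => intro start h1 h2; omega
  | succ fuel ih =>
    intro start h1 h2
    rw [show pvFindAll s w d (start : Int) (fuel + 1)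
        = if PySem.Chars.findFrom s w (start : Int) = -1 then []
          else (PySem.Chars.findFrom s w (start : Int), d)
            :: pvFindAll s w d (PySem.Chars.findFrom s w (start : Int) + 1) fuel from rfl]
    by_cases hj : PySem.Chars.findFrom s w (start : Int) = -1
    · rw [if_pos hj]
      have hno : ¬ w <:+: s.drop start :=
        (PySem.Chars.findFrom_natCast_eq_neg_one_iff s w start h1).1 hj
      symm
      rw [List.flatMap_eq_nil_iff]
      intro i hi
      rw [List.mem_range'_1] at hi
      rw [if_neg]
      intro hpre
      have hdd : s.drop i = (s.drop start).drop (i - start) := by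
        rw [List.drop_drop]; congr 1; omega
      rw [hdd] at hpre
      exact hno (hpre.isInfix.trans (List.drop_suffix _ _).isInfix)
    · have hspec := PySem.Chars.findFrom_natCast_spec s w start h1 hj
      obtain ⟨hge, hpre, hmin⟩ := hspec
      set j := PySem.Chars.findFrom s w (start : Int) with hjdef
      set m := j.toNat with hmdef
      have hj0 : (0 : Int) ≤ j := le_trans (by exact_mod_cast Nat.zero_le start) hge
      have hjm : (m : Int) = j := Int.toNat_of_nonneg hj0
      have hms : start ≤ m := by omega
      have hmlt : m < s.length := by
        rcases hpre with ⟨t, ht⟩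
        have : w.length + t.length = s.length - m := by
          rw [← List.length_append, ht, List.length_drop]
        have hwpos : 0 < w.length := List.length_pos_iff.2 hw
        omega
      rw [if_neg hj]
      have hsplit : List.range' start (s.length - start)
          = List.range' start (m - start) ++ List.range' m 1 ++
            List.range' (m + 1) (s.length - (m + 1)) := by
        have e1 : s.length - start = (m - start) + (1 + (s.length - (m + 1))) := by omega
        have e2 : start + (m - start) = m := by omega
        rw [e1, ← List.range'_append_1, e2, ← List.range'_append_1, List.append_assoc]
      rw [hsplit, List.flatMap_append, List.flatMap_append]
      have hleft : (List.range' start (m - start)).flatMap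
          (fun i => if w <+: s.drop i then [((i : Int), d)] else []) = [] := by
        rw [List.flatMap_eq_nil_iff]
        intro i hi
        rw [List.mem_range'_1] at hi
        rw [if_neg (hmin i hi.1 (by omega))]
      have hmid : (List.range' m 1).flatMap
          (fun i => if w <+: s.drop i then [((i : Int), d)] else []) = [(j, d)] := by
        simp [if_pos hpre, hjm]
      rw [hleft, hmid]
      have hrec := ih (m + 1) (by omega) (by omega)
      have hcast : (((m + 1 : Nat)) : Int) = j + 1 := by push_cast; omega
      rw [hcast] at hrec
      rw [hrec]
      simp

-- the digit-character part and the word part of pvTok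
def pvD (s : List Char) (i : Nat) : List (Int × String) :=
  match s[i]? with
  | some c => if PySem.Chars.isdigit c then [((i : Int), String.ofList [c])] else []
  | none => []

def pvW (s : List Char) (wd : String × String) (i : Nat) : List (Int × String) :=
  if wd.1.toList <+: s.drop i then [((i : Int), wd.2)] else []

lemma pv_filterMap_if (l : List (String × String)) (P : String × String → Prop)
    [DecidablePred P] (f : String × String → Int × String) :
    l.filterMap (fun wd => if P wd then some (f wd) else none)
    = l.flatMap (fun wd => if P wd then [f wd] else []) := by
  induction l with
  | nil => rfl
  | cons a t ih => by_cases h : P a <;> simp [h, ih]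

lemma pvTok_eq (s : List Char) (i : Nat) :
    pvTok s i = pvD s i ++ SPELLED_MAPPING.flatMap (fun wd => pvW s wd i) := by
  unfold pvTok pvD pvW
  rw [pv_filterMap_if]

lemma pv_enum (s : List Char) (a : Int) :
    ((PySem.List.enumerate s a).filter (fun p => PySem.Chars.isdigit p.2)).map
      (fun p => (p.1, String.ofList [p.2]))
    = (List.range s.length).flatMap (fun (k : Nat) =>
        match s[k]? with
        | some c => if PySem.Chars.isdigit c then [(a + (k : Int), String.ofList [c])] else []
        | none => []) := by
  induction s generalizing a with
  | nil => rfl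
  | cons c t ih =>
    have hstep : PySem.List.enumerate (c :: t) a = (a, c) :: PySem.List.enumerate t (a + 1) := rfl
    rw [hstep, List.length_cons, List.range_succ_eq_map, List.flatMap_cons, List.flatMap_map]
    have htail : (List.range t.length).flatMap
        (fun (k : Nat) => match (c :: t)[k + 1]? with
          | some c => if PySem.Chars.isdigit c then
              [(a + ((k + 1 : Nat) : Int), String.ofList [c])] else []
          | none => [])
        = (List.range t.length).flatMap (fun (k : Nat) =>
            match t[k]? with
            | some c => if PySem.Chars.isdigit c then
                [(a + 1 + (k : Int), String.ofList [c])] else []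
            | none => []) := by
      apply List.flatMap_congr
      intro k hk
      rw [List.getElem?_cons_succ]
      have hc : (a + ((k + 1 : Nat) : Int)) = a + 1 + (k : Int) := by push_cast; ring
      rw [hc]
    simp only [Nat.succ_eq_add_one] at htail ⊢
    rw [htail, ← ih (a + 1)]
    by_cases hd : PySem.Chars.isdigit c <;> simp [hd]

lemma pv_flatMap_comm {α γ β : Type} (l : List α) (l' : List γ) (h : α → γ → List β) :
    (l.flatMap fun a => l'.flatMap (h a)).Perm (l'.flatMap fun b => l.flatMap fun a => h a b) := by
  induction l with
  | nil => simp
  | cons a t ih =>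
    rw [List.flatMap_cons]
    refine (List.Perm.append_left _ ih).trans ?_
    exact List.flatMap_append_perm l' (h a) (fun b => t.flatMap fun a => h a b)

lemma pv_B_pairs_perm (s : List Char) :
    (pvAll s).Perm
    (SPELLED_MAPPING.foldl (fun acc wd => acc ++ pvFindAll s wd.1.toList wd.2 0 (s.length + 1))
      (((PySem.List.enumerate s).filter (fun p => PySem.Chars.isdigit p.2)).map
        (fun p => (p.1, String.ofList [p.2])))) := by
  rw [PySem.List.foldl_append_eq_flatMap]
  have hDg : ((PySem.List.enumerate s).filter (fun p => PySem.Chars.isdigit p.2)).map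
      (fun p => (p.1, String.ofList [p.2])) = (List.range s.length).flatMap (pvD s) := by
    rw [pv_enum s 0]
    apply List.flatMap_congr
    intro k _
    unfold pvD
    rcases s[k]? with _ | c
    · rfl
    · simp
  have hocc : SPELLED_MAPPING.flatMap (fun wd => pvFindAll s wd.1.toList wd.2 0 (s.length + 1))
      = SPELLED_MAPPING.flatMap (fun wd => (List.range s.length).flatMap (fun i => pvW s wd i)) := by
    apply List.flatMap_congr
    intro wd hwd
    have hw : wd.1.toList ≠ [] := by fin_cases hwd <;> decide
    have h := pvFindAll_eq s wd.1.toList wd.2 hw (s.length + 1) 0 (Nat.zero_le _) (by omega)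
    rw [Nat.cast_zero] at h
    rw [h, Nat.sub_zero, ← List.range_eq_range']
    simp only [pvW]
  rw [hDg, hocc]
  have h1 : pvAll s = (List.range s.length).flatMap
      (fun i => pvD s i ++ SPELLED_MAPPING.flatMap (fun wd => pvW s wd i)) := by
    unfold pvAll
    exact List.flatMap_congr (fun i _ => pvTok_eq s i)
  rw [h1]
  refine ((List.flatMap_append_perm _ (pvD s) _).symm).trans ?_
  exact List.Perm.append_left _ (pv_flatMap_comm _ _ _)

lemma pv_no_prefix : ∀ a ∈ SPELLED_MAPPING, ∀ b ∈ SPELLED_MAPPING,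
    a.1.toList <+: b.1.toList → a = b := by decide

lemma pv_first_not_digit : ∀ wd ∈ SPELLED_MAPPING,
    PySem.Chars.isdigit (wd.1.toList.headD 'x') = false := by decide

lemma pv_flatMap_if_le_one {α β : Type} (l : List α) (P : α → Prop) [DecidablePred P]
    (f : α → β) (h : l.Pairwise (fun a b => ¬(P a ∧ P b))) :
    (l.flatMap (fun a => if P a then [f a] else [])).length ≤ 1 := by
  induction l with
  | nil => simp
  | cons a t ih =>
    rw [List.flatMap_cons, List.length_append]
    rcases List.pairwise_cons.1 h with ⟨ha, ht⟩
    by_cases hp : P a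
    · have hnil : t.flatMap (fun b => if P b then [f b] else []) = [] :=
        List.flatMap_eq_nil_iff.2 (fun b hb => by
          rw [if_neg]; intro hpb; exact ha b hb ⟨hp, hpb⟩)
      simp [if_pos hp, hnil]
    · simpa [if_neg hp] using ih ht

lemma pv_word_part_le_one (s : List Char) (i : Nat) :
    (SPELLED_MAPPING.flatMap (fun wd => pvW s wd i)).length ≤ 1 := by
  have hnd : SPELLED_MAPPING.Pairwise (· ≠ ·) := by decide
  have hpp : SPELLED_MAPPING.Pairwise
      (fun a b => ¬((a.1.toList <+: s.drop i) ∧ (b.1.toList <+: s.drop i))) := by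
    refine List.Pairwise.imp_of_mem ?_ hnd
    intro a b ha hb hne ⟨pa, pb⟩
    rcases List.prefix_or_prefix_of_prefix pa pb with h | h
    · exact hne (pv_no_prefix a ha b hb h)
    · exact hne (pv_no_prefix b hb a ha h).symm
  simpa [pvW] using pv_flatMap_if_le_one SPELLED_MAPPING
    (fun wd => wd.1.toList <+: s.drop i) (fun wd => ((i : Int), wd.2)) hpp

lemma pv_tok_key (s : List Char) (i : Nat) : ∀ p ∈ pvTok s i, p.1 = (i : Int) := by
  intro p hp
  rw [pvTok_eq] at hp
  rcases List.mem_append.1 hp with h | h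
  · unfold pvD at h
    rcases hx : s[i]? with _ | c <;> rw [hx] at h
    · simp at h
    · by_cases hd : PySem.Chars.isdigit c <;> simp [hd] at h
      simp [h]
  · simp only [List.mem_flatMap] at h
    obtain ⟨wd, _, hw⟩ := h
    unfold pvW at hw
    split at hw
    · simp at hw; simp [hw]
    · simp at hw

lemma pv_tok_len (s : List Char) (i : Nat) : (pvTok s i).length ≤ 1 := by
  rw [pvTok_eq, List.length_append]
  rcases hx : s[i]? with _ | c
  · have hD : pvD s i = [] := by unfold pvD; rw [hx]
    simpa [hD] using pv_word_part_le_one s i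
  · have hD : pvD s i
        = if PySem.Chars.isdigit c then [((i : Int), String.ofList [c])] else [] := by
      unfold pvD; rw [hx]
    by_cases hd : PySem.Chars.isdigit c
    · have hw0 : SPELLED_MAPPING.flatMap (fun wd => pvW s wd i) = [] := by
        apply List.flatMap_eq_nil_iff.2
        intro wd hwd
        unfold pvW
        rw [if_neg]
        intro hpre
        rcases hh : wd.1.toList with _ | ⟨d, r⟩
        · have hne : wd.1.toList ≠ [] := by fin_cases hwd <;> decide
          exact hne hh
        · rw [hh] at hpre
          rcases hpre with ⟨u, hu⟩
          have hsome : s[i]? = some d := by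
            have hdl : s.drop i = d :: (r ++ u) := by rw [← hu]; simp
            rw [← List.head?_drop, hdl]; rfl
          have hcd : c = d := Option.some.inj (by rw [← hx, hsome])
          have hf := pv_first_not_digit wd hwd
          rw [hh] at hf
          simp only [List.headD_cons] at hf
          rw [hcd] at hd
          simp [hf] at hd
      simp [hD, hd, hw0]
    · have hD0 : pvD s i = [] := by rw [hD, if_neg hd]
      simpa [hD0] using pv_word_part_le_one s i

lemma pv_group_pairwise (n : Nat) (f : Nat → List (Int × String))
    (hkey : ∀ i, ∀ p ∈ f i, p.1 = (i : Int))
    (hlen : ∀ i, (f i).length ≤ 1) :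
    ((List.range n).flatMap f).Pairwise (fun a b => a.1 < b.1) := by
  induction n with
  | zero => simp
  | succ n ih =>
    rw [List.range_succ, List.flatMap_append, List.flatMap_singleton]
    apply List.pairwise_append.2
    refine ⟨ih, ?_, ?_⟩
    · rcases hfn : f n with _ | ⟨a, t⟩
      · exact List.Pairwise.nil
      · rcases ht : t with _ | ⟨b, u⟩
        · simp
        · have := hlen n
          rw [hfn, ht] at this
          simp at this
    · intro a ha b hb
      simp only [List.mem_flatMap, List.mem_range] at ha
      obtain ⟨i, hin, hai⟩ := ha
      rw [hkey i a hai, hkey n b hb]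
      exact_mod_cast hin

lemma pv_pvAll_pairwise (s : List Char) :
    (pvAll s).Pairwise (fun a b => a.1 < b.1) :=
  pv_group_pairwise s.length (pvTok s) (pv_tok_key s) (pv_tok_len s)

-- ===== VERDICT (by name: the statement is the Claim_ definition above) =====
theorem get_all_numbers_from_row_spec : Claim_equal_get_all_numbers_from_row := by
  intro row _
  show _ = _
  rw [pv_A_eq_map_pvAll]
  simp only [get_all_numbers_from_row_alt]
  rw [PySem.List.sorted_eq_of_perm_of_pairwise_lt _ (pvAll row.toList) (fun p => p.1)
    (pv_B_pairs_perm row.toList) (pv_pvAll_pairwise row.toList)]
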